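-- pv_equiv track=rewrite | github.com/JKang918/Leetcode | 0844 Backspace String Compare [Easy]/Solution.py | buildingStack
-- ===== SOURCE A (Python) =====
-- def buildingStack(s: str) -> str: #make it a function because the same process is repeated for s and t
--     stack = []
--     for c in s:
--         if c != "#":
--             stack.append(c)
--         if c == "#" and stack:
--             stack.pop()
--     return "".join(stack)
-- ===== SOURCE B (Python) =====
-- def buildingStack(s: str) -> str:
--     res = []
--     skip = 0
--     for c in reversed(s):
--         if c == "#":
--             skip += 1
--         elif skip > 0:
--             skip -= 1
--         else:
--             res.append(c)
--     return "".join(reversed(res))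
-- ===== Notes on version B (the rewrite author's own statement) =====
-- stated objective: alternative
-- what changed: Replaces the forward stack (append/pop) with a single right-to-left scan keeping only an integer skip counter of pending backspaces, collecting survivors and reversing them at the end.
import Mathlib
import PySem

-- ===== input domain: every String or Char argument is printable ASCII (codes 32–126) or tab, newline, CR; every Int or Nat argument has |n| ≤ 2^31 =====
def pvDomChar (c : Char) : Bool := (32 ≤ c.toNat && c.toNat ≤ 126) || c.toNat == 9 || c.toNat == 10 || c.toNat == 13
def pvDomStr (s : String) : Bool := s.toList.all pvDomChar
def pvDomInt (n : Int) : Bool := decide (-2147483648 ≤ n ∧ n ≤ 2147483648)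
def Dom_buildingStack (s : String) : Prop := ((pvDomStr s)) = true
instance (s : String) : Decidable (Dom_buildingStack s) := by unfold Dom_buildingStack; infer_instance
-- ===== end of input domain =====

-- B replaces A's forward stack with a right-to-left scan carrying a skip counter (alternative decomposition, same cost).

-- ===== PORT A =====
-- one iteration of A's for-loop body (the two ifs on the stack)
def pvStepA (stack : List Char) (c : Char) : List Char :=
  let stack1 := if c ≠ '#' then stack ++ [c] else stack
  if c = '#' ∧ stack1 ≠ [] then stack1.dropLast else stack1

def buildingStack (s : String) : String :=
  String.mk (s.toList.foldl pvStepA [])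

-- ===== PORT B =====
-- one iteration of B's loop over reversed(s): state is (skip, res)
def pvStepB (st : Int × List Char) (c : Char) : Int × List Char :=
  if c = '#' then (st.1 + 1, st.2)
  else if st.1 > 0 then (st.1 - 1, st.2)
  else (st.1, st.2 ++ [c])

def buildingStack_alt (s : String) : String :=
  let p := s.toList.reverse.foldl pvStepB (0, [])
  String.mk p.2.reverse

-- ===== PRECONDITION & SPEC =====
def Spec_buildingStack (s : String) (out : String) : Prop := out = buildingStack_alt s
instance (s : String) (out : String) : Decidable (Spec_buildingStack s out) := by unfold Spec_buildingStack; infer_instance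

-- ===== CLAIM (what is proved, stated in full; the proofs are below) =====
def Claim_equal_buildingStack : Prop := ∀ (s : String), Dom_buildingStack s → Spec_buildingStack s (buildingStack s)

-- ===== LEMMAS AND PROOFS =====

-- the skip counter stays nonnegative
theorem pvScan_nonneg (l : List Char) (st : Int × List Char) (h : 0 ≤ st.1) :
    0 ≤ (l.foldl pvStepB st).1 := by
  induction l generalizing st with
  | nil => simpa using h
  | cons c l ih =>
    simp only [List.foldl_cons]
    apply ih
    simp only [pvStepB]
    split_ifs with h1 h2 <;> simp <;> omega

theorem pvDropLast_iter_nil (n : Nat) : (List.dropLast (α := Char))^[n] [] = [] := by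
  induction n with
  | zero => rfl
  | succ n ih => rw [Function.iterate_succ_apply]; simpa using ih

-- main invariant: A's fold from any stack = k pops then append the reversed survivors,
-- where (k, r) is B's scan of the same characters (processed right to left)
theorem pvMain (l : List Char) (st : List Char) :
    l.foldl pvStepA st =
      (List.dropLast)^[(l.reverse.foldl pvStepB (0, [])).1.toNat] st
        ++ (l.reverse.foldl pvStepB (0, [])).2.reverse := by
  induction l generalizing st with
  | nil => simp
  | cons c l ih =>
    have hnn : 0 ≤ (l.reverse.foldl pvStepB ((0 : Int), ([] : List Char))).1 :=
      pvScan_nonneg _ _ (by simp)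
    simp only [List.foldl_cons, List.reverse_cons, List.foldl_append]
    rw [ih]
    set P := l.reverse.foldl pvStepB (0, []) with hP
    by_cases hc : c = '#'
    · subst hc
      have hA : pvStepA st '#' = st.dropLast := by
        simp only [pvStepA]
        split_ifs with h <;> simp_all
      rw [hA]
      simp only [pvStepB, List.foldl_nil, reduceIte]
      have hk1 : (P.1 + 1).toNat = P.1.toNat + 1 := by omega
      rw [hk1, Function.iterate_succ_apply]
    · have hA : pvStepA st c = st ++ [c] := by simp [pvStepA, hc]
      rw [hA]
      by_cases hk : P.1 > 0
      · simp only [pvStepB, List.foldl_nil, if_neg hc, if_pos hk]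
        have h1 : P.1.toNat = (P.1 - 1).toNat + 1 := by omega
        rw [h1, Function.iterate_succ_apply, List.dropLast_concat]
      · have hk0 : P.1 = 0 := by omega
        simp only [pvStepB, List.foldl_nil, if_neg hc, hk0]
        simp

-- ===== VERDICT (by name: the statement is the Claim_ definition above) =====
theorem buildingStack_spec : Claim_equal_buildingStack := by
  intro s _
  unfold Spec_buildingStack buildingStack buildingStack_alt
  rw [pvMain]
  simp [pvDropLast_iter_nil]
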